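-- pv_equiv track=rewrite | github.com/ellxor/aoc2025 | day04.py | solve
-- ===== SOURCE A (Python) =====
-- def remove_stacks(grid, focus):
--     width = len(grid[0])
--     height = len(grid)
--     total = 0
--
--     next = [row.copy() for row in grid]
--     delta = set()
--
--     for x, y in focus:
--         if grid[y][x]:
--             nbors = [
--                 (x + dx, y + dy)
--                 for dx in range(-1, 2)
--                 for dy in range(-1, 2)
--                 if not (dx == 0 and dy == 0)
--                 if x + dx >= 0 and x + dx < width
--                 if y + dy >= 0 and y + dy < height
--             ]
--
--             if sum([grid[ny][nx] for (nx, ny) in nbors]) < 4: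
--                 next[y][x] = False
--                 delta.update(nbors)
--                 total += 1
--
--     return total, next, delta
--
-- def solve(input):
--     grid = [[c == "@" for c in line] for line in input]
--     focus = set([(x, y) for y in range(len(grid)) for x in range(len(grid[0]))])
--
--     part1, grid, delta = remove_stacks(grid, focus)
--     part2 = part1
--
--     while True:
--         removed, grid, delta = remove_stacks(grid, delta)
--         part2 += removed
--
--         if not removed:
--             break
--
--     return part1, part2
-- ===== SOURCE B (Python) =====
-- def solve(input):
--     width = len(input[0])
--     height = len(input)
--     grid = [[line[x] == "@" for x in range(width)] for line in input]
--
--     def living_neighbors(g, x, y):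
--         count = 0
--         for dy in (-1, 0, 1):
--             for dx in (-1, 0, 1):
--                 if (dx or dy) and 0 <= x + dx < width and 0 <= y + dy < height and g[y + dy][x + dx]:
--                     count += 1
--         return count
--
--     def step(g):
--         removed = 0
--         nxt = []
--         for y in range(height):
--             row = []
--             for x in range(width):
--                 alive = g[y][x]
--                 if alive and living_neighbors(g, x, y) < 4:
--                     alive = False
--                     removed += 1
--                 row.append(alive)
--             nxt.append(row)
--         return removed, nxt
--
--     part1, grid = step(grid)
--     part2 = part1
--     while True:
--         removed, grid = step(grid)
--         part2 += removed
--         if removed == 0: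
--             break
--     return part1, part2
-- ===== Notes on version B (the rewrite author's own statement) =====
-- stated objective: simpler
-- what changed: B drops A's frontier/delta set entirely: each round is a synchronous full-grid pass that rebuilds a fresh grid (a cell dies when alive with fewer than 4 living in-bounds neighbors), looping until a pass removes nothing, instead of A's worklist of neighbor coordinates of previously removed cells.
import Mathlib
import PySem

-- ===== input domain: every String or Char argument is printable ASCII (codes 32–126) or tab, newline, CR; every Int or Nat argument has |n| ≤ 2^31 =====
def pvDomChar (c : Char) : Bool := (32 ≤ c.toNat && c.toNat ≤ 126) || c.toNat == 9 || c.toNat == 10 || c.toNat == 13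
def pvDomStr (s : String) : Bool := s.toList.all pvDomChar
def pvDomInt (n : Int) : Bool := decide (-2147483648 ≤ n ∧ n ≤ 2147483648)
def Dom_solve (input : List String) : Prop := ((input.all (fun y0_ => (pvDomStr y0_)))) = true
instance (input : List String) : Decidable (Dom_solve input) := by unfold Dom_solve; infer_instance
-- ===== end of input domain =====

-- B replaces A's frontier/delta worklist by a synchronous full-grid pass per round (simpler:
-- no delta-set bookkeeping); return values agree on all inputs admitted by Pre_solve.

-- ===== PORT A =====
-- g[y][x] (indices here are always ≥ 0 when Python evaluates them)
def pvCell (g : List (List Bool)) (x y : Int) : Bool :=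
  PySem.List.pyGetD (PySem.List.pyGetD g y []) x false

-- the `nbors` comprehension (dx outer, dy inner, same filters in order)
def pvNbors (width height x y : Int) : List (Int × Int) :=
  (PySem.List.pyRange (-1) 2 1).flatMap (fun dx =>
    (PySem.List.pyRange (-1) 2 1).filterMap (fun dy =>
      if ¬(dx = 0 ∧ dy = 0) ∧ 0 ≤ x + dx ∧ x + dx < width ∧ 0 ≤ y + dy ∧ y + dy < height
      then some (x + dx, y + dy) else none))

-- next[y][x] = False
def pvClear (g : List (List Bool)) (x y : Int) : List (List Bool) :=
  PySem.List.pySetD g y (PySem.List.pySetD (PySem.List.pyGetD g y []) x false)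

def removeStacks (grid : List (List Bool)) (focus : List (Int × Int)) :
    Int × List (List Bool) × List (Int × Int) :=
  let width : Int := ((PySem.List.pyGetD grid 0 []).length : Int)
  let height : Int := (grid.length : Int)
  focus.foldl (fun st xy =>
    if pvCell grid xy.1 xy.2 then
      let nb := pvNbors width height xy.1 xy.2
      if ((nb.map (fun p => if pvCell grid p.1 p.2 then (1:Int) else 0)).sum) < 4 then
        (st.1 + 1, pvClear st.2.1 xy.1 xy.2, PySem.Set.update st.2.2 nb)
      else st
    else st) (0, grid.map (fun row => row), PySem.Set.empty)

-- the `while True` loop; fuel w*h+1 is a totality guard only (one productive round clears at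
-- least one living cell, so the loop runs at most w*h+1 times and the guard never fires)
def pvLoopA : Nat → List (List Bool) → List (Int × Int) → Int → Int
  | 0, _, _, part2 => part2
  | n+1, grid, delta, part2 =>
    let r := removeStacks grid delta
    if r.1 = 0 then part2 + r.1 else pvLoopA n r.2.1 r.2.2 (part2 + r.1)

def solve (input : List String) : Int × Int :=
  let grid := input.map (fun line => line.toList.map (fun c => c == '@'))
  let focus : PySem.Set (Int × Int) :=
    PySem.Set.ofList ((PySem.List.pyRange 0 (grid.length : Int) 1).flatMap (fun y =>
      (PySem.List.pyRange 0 ((PySem.List.pyGetD grid 0 []).length : Int) 1).map (fun x => (x, y))))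
  let r := removeStacks grid focus
  (r.1, pvLoopA ((PySem.List.pyGetD grid 0 []).length * grid.length + 1) r.2.1 r.2.2 r.1)

-- ===== PORT B =====
-- living_neighbors: dy outer, dx inner over (-1, 0, 1)
def pvCount (g : List (List Bool)) (width height x y : Int) : Int :=
  [(-1 : Int), 0, 1].foldl (fun count dy =>
    [(-1 : Int), 0, 1].foldl (fun count dx =>
      if (¬(dx = 0 ∧ dy = 0) ∧ 0 ≤ x + dx ∧ x + dx < width ∧ 0 ≤ y + dy ∧ y + dy < height) ∧
          pvCell g (x + dx) (y + dy) = true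
      then count + 1 else count) count) 0

-- step: one synchronous pass building a fresh grid
def pvStep (width height : Int) (g : List (List Bool)) : Int × List (List Bool) :=
  (PySem.List.pyRange 0 height 1).foldl (fun st y =>
    let inner := (PySem.List.pyRange 0 width 1).foldl (fun st2 x =>
      let alive := pvCell g x y
      if alive = true ∧ pvCount g width height x y < 4 then (st2.1 + 1, st2.2 ++ [false])
      else (st2.1, st2.2 ++ [alive])) ((st.1 : Int), ([] : List Bool))
    (inner.1, st.2 ++ [inner.2])) (0, [])

-- B's while loop; same fuel guard as A's port
def pvLoopB : Nat → Int → Int → List (List Bool) → Int → Int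
  | 0, _, _, _, part2 => part2
  | n+1, width, height, grid, part2 =>
    let r := pvStep width height grid
    if r.1 = 0 then part2 + r.1 else pvLoopB n width height r.2 (part2 + r.1)

def solve_alt (input : List String) : Int × Int :=
  let width : Int := PySem.Str.len (PySem.List.pyGetD input 0 "")
  let height : Int := (input.length : Int)
  let grid := input.map (fun line =>
    (PySem.List.pyRange 0 width 1).map (fun x => PySem.List.pyGetD line.toList x ' ' == '@'))
  let r := pvStep width height grid
  (r.1, pvLoopB (width.toNat * input.length + 1) width height r.2 r.1)

-- ===== PRECONDITION & SPEC =====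
-- Pre_solve excludes exactly the inputs on which Python A raises IndexError: the empty list
-- (len(grid[0])) and inputs where some line is shorter than the first line (grid[y][x] with
-- x < len(grid[0])); A returns on every other input, and so does B.
def Pre_solve (input : List String) : Prop :=
  input ≠ [] ∧ ∀ line ∈ input, (input.headD "").toList.length ≤ line.toList.length
instance (input : List String) : Decidable (Pre_solve input) := by unfold Pre_solve; infer_instance

def pvWitness_solve : List String := ["@@.", "@@@", ".@@"]

def Spec_solve (input : List String) (out : Int × Int) : Prop := out = solve_alt input
instance (input : List String) (out : Int × Int) : Decidable (Spec_solve input out) := by unfold Spec_solve; infer_instance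

-- ===== CLAIM (what is proved, stated in full; the proofs are below) =====
def Claim_equal_solve : Prop := ∀ (input : List String), Dom_solve input → Pre_solve input → Spec_solve input (solve input)


-- ===== LEMMAS AND PROOFS =====

-- ---- semantic layer (proof-side helpers) ----

def inWin (w h : Int) (p : Int × Int) : Prop := 0 ≤ p.1 ∧ p.1 < w ∧ 0 ≤ p.2 ∧ p.2 < h

def pvCntS (g : List (List Bool)) (w h x y : Int) : Int :=
  ((pvNbors w h x y).map (fun p => if pvCell g p.1 p.2 then (1:Int) else 0)).sum

def pvRem (g : List (List Bool)) (w h : Int) (p : Int × Int) : Bool :=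
  pvCell g p.1 p.2 && decide (pvCntS g w h p.1 p.2 < 4)

def windowL (w h : Int) : List (Int × Int) :=
  (PySem.List.pyRange 0 h 1).flatMap (fun y => (PySem.List.pyRange 0 w 1).map (fun x => (x, y)))

def pvInv (w h : Int) (GA GB : List (List Bool)) (Δ : List (Int × Int)) : Prop :=
  (GA.length : Int) = h ∧ ((PySem.List.pyGetD GA 0 []).length : Int) = w ∧
  (∀ p : Int × Int, inWin w h p → pvCell GA p.1 p.2 = pvCell GB p.1 p.2) ∧
  Δ.Nodup ∧ (∀ p ∈ Δ, inWin w h p) ∧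
  (∀ p : Int × Int, inWin w h p → pvRem GA w h p → p ∈ Δ)

lemma pvRem_iff (g : List (List Bool)) (w h : Int) (p : Int × Int) :
    pvRem g w h p = true ↔ (pvCell g p.1 p.2 = true ∧ pvCntS g w h p.1 p.2 < 4) := by
  unfold pvRem
  simp

-- ---- neighbour list facts ----
lemma mem_pvNbors (w h x y a b : Int) :
    (a, b) ∈ pvNbors w h x y ↔
      (¬(a = x ∧ b = y) ∧ x - 1 ≤ a ∧ a ≤ x + 1 ∧ y - 1 ≤ b ∧ b ≤ y + 1 ∧
        0 ≤ a ∧ a < w ∧ 0 ≤ b ∧ b < h) := by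
  have hr : PySem.List.pyRange (-1) 2 1 = [-1, 0, 1] := by decide
  simp only [pvNbors, hr, List.mem_flatMap, List.mem_filterMap]
  constructor
  · rintro ⟨dx, hdx, dy, hdy, hif⟩
    simp only [List.mem_cons, List.not_mem_nil, or_false] at hdx hdy
    split at hif
    · rename_i hc
      obtain ⟨h1, h2, h3, h4, h5⟩ := hc
      obtain ⟨ha, hb⟩ := Prod.mk.injEq .. ▸ (Option.some.injEq .. ▸ hif : (x + dx, y + dy) = (a, b))
      rcases hdx with rfl | rfl | rfl <;> rcases hdy with rfl | rfl | rfl <;> omega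
    · exact absurd hif (by simp)
  · rintro ⟨h1, h2, h3, h4, h5, h6, h7, h8, h9⟩
    refine ⟨a - x, ?_, b - y, ?_, ?_⟩
    · have : a - x = -1 ∨ a - x = 0 ∨ a - x = 1 := by omega
      rcases this with h | h | h <;> simp [h]
    · have : b - y = -1 ∨ b - y = 0 ∨ b - y = 1 := by omega
      rcases this with h | h | h <;> simp [h]
    · rw [if_pos (⟨fun hc => h1 ⟨by omega, by omega⟩, by omega, by omega, by omega, by omega⟩ :
        ¬(a - x = 0 ∧ b - y = 0) ∧ 0 ≤ x + (a - x) ∧ x + (a - x) < w ∧ 0 ≤ y + (b - y) ∧ y + (b - y) < h)]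
      simp only [Option.some.injEq, Prod.mk.injEq]
      exact ⟨by omega, by omega⟩

lemma pvNbors_symm (w h x y a b : Int) (hx : 0 ≤ x) (hx2 : x < w) (hy : 0 ≤ y) (hy2 : y < h)
    (ha : 0 ≤ a) (ha2 : a < w) (hb : 0 ≤ b) (hb2 : b < h) :
    (a, b) ∈ pvNbors w h x y ↔ (x, y) ∈ pvNbors w h a b := by
  rw [mem_pvNbors, mem_pvNbors]
  constructor
  · rintro ⟨h1, h2, h3, h4, h5, h6, h7, h8, h9⟩
    exact ⟨fun hc => h1 ⟨by omega, by omega⟩, by omega, by omega, by omega, by omega,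
      hx, hx2, hy, hy2⟩
  · rintro ⟨h1, h2, h3, h4, h5, h6, h7, h8, h9⟩
    exact ⟨fun hc => h1 ⟨by omega, by omega⟩, by omega, by omega, by omega, by omega,
      by omega, by omega, by omega, by omega⟩

lemma inWin_of_mem_pvNbors {w h x y : Int} {q : Int × Int} (hq : q ∈ pvNbors w h x y) :
    inWin w h q := by
  obtain ⟨a, b⟩ := q
  rw [mem_pvNbors] at hq
  exact ⟨hq.2.2.2.2.2.1, hq.2.2.2.2.2.2.1, hq.2.2.2.2.2.2.2.1, hq.2.2.2.2.2.2.2.2⟩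

lemma pvCntS_congr {g g' : List (List Bool)} {w h : Int} (x y : Int)
    (hc : ∀ q : Int × Int, inWin w h q → pvCell g q.1 q.2 = pvCell g' q.1 q.2) :
    pvCntS g w h x y = pvCntS g' w h x y := by
  unfold pvCntS
  congr 1
  refine List.map_congr_left (fun q hq => ?_)
  rw [hc q (inWin_of_mem_pvNbors hq)]

lemma pvRem_congr {g g' : List (List Bool)} {w h : Int} {p : Int × Int} (hp : inWin w h p)
    (hc : ∀ q : Int × Int, inWin w h q → pvCell g q.1 q.2 = pvCell g' q.1 q.2) :
    (pvRem g w h p ↔ pvRem g' w h p) := by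
  unfold pvRem
  rw [hc p hp, pvCntS_congr p.1 p.2 hc]

lemma sum_map_filterMap_ite {α β : Type} (l : List α) (C : α → Prop) [DecidablePred C]
    (f : α → β) (v : β → Int) :
    ((l.filterMap (fun d => if C d then some (f d) else none)).map v).sum
      = (l.map (fun d => if C d then v (f d) else 0)).sum := by
  induction l with
  | nil => simp
  | cons a t ih => by_cases h : C a <;> simp [h, ih]

lemma sum_map_flatMap {α β : Type} (l : List α) (F : α → List β) (v : β → Int) :
    ((l.flatMap F).map v).sum = (l.map (fun a => ((F a).map v).sum)).sum := by
  induction l with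
  | nil => simp
  | cons a t ih => simp [List.flatMap_cons, List.map_append, List.sum_append, ih]

lemma foldl_ite_add {α : Type} (l : List α) (P : α → Prop) [DecidablePred P] (c0 : Int) :
    l.foldl (fun c d => if P d then c + 1 else c) c0
      = c0 + (l.map (fun d => if P d then (1:Int) else 0)).sum := by
  induction l generalizing c0 with
  | nil => simp
  | cons a t ih => by_cases h : P a <;> simp [h, ih] <;> ring

lemma ite_and_cell (C : Prop) [Decidable C] (b : Bool) :
    (if C ∧ b = true then (1:Int) else 0) = if C then (if b then (1:Int) else 0) else 0 := by
  by_cases h : C <;> cases b <;> simp [h]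

lemma pvCount_eq (g : List (List Bool)) (w h x y : Int) :
    pvCount g w h x y = pvCntS g w h x y := by
  have hr : PySem.List.pyRange (-1) 2 1 = [-1, 0, 1] := by decide
  unfold pvCount pvCntS pvNbors
  rw [hr, sum_map_flatMap]
  simp only [sum_map_filterMap_ite, foldl_ite_add, ite_and_cell, PySem.List.foldl_add]
  simp only [List.map_cons, List.map_nil, List.sum_cons, List.sum_nil]
  ring

lemma mem_windowL (w h : Int) (p : Int × Int) : p ∈ windowL w h ↔ inWin w h p := by
  obtain ⟨a, b⟩ := p
  simp only [windowL, List.mem_flatMap, List.mem_map, PySem.List.mem_pyRange_one, inWin]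
  constructor
  · rintro ⟨y', ⟨hy1, hy2⟩, x', ⟨hx1, hx2⟩, heq⟩
    obtain ⟨h1, h2⟩ := Prod.mk.injEq .. ▸ heq
    exact ⟨by omega, by omega, by omega, by omega⟩
  · rintro ⟨h1, h2, h3, h4⟩
    exact ⟨b, ⟨h3, h4⟩, a, ⟨h1, h2⟩, rfl⟩

lemma nodup_windowL (w h : Int) : (windowL w h).Nodup := by
  rw [windowL, List.nodup_flatMap]
  refine ⟨fun yy _ => ?_, ?_⟩
  · exact (PySem.List.nodup_pyRange_one 0 w).map (fun a b hab => by
      simpa using congrArg Prod.fst hab)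
  · refine (PySem.List.nodup_pyRange_one 0 h).pairwise_of_forall_ne (fun a _ b _ hne => ?_)
    intro q hqa hqb
    simp only [List.mem_map] at hqa hqb
    obtain ⟨xa, _, rfl⟩ := hqa
    obtain ⟨xb, _, heq⟩ := hqb
    exact hne (by simpa using (congrArg Prod.snd heq).symm)

lemma countP_flatMap_sum {α β : Type} (l : List α) (g : α → List β) (p : β → Bool) :
    ((l.flatMap g).countP p : Int) = (l.map (fun a => ((g a).countP p : Int))).sum := by
  induction l with
  | nil => simp
  | cons a t ih => simp [List.flatMap_cons, List.countP_append, ih]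

lemma countP_eq_countP {α : Type} [DecidableEq α] {l1 l2 : List α} (p : α → Bool)
    (h1 : l1.Nodup) (h2 : l2.Nodup) (hm : ∀ a, (a ∈ l1 ∧ p a) ↔ (a ∈ l2 ∧ p a)) :
    l1.countP p = l2.countP p := by
  rw [List.countP_eq_length_filter, List.countP_eq_length_filter]
  refine List.Perm.length_eq ?_
  rw [List.perm_ext_iff_of_nodup (h1.filter p) (h2.filter p)]
  intro a
  simp only [List.mem_filter]
  exact hm a

lemma getD_set_ite {α : Type} (l : List α) (m : Nat) (v d : α) (i : Nat) :
    (l.set m v).getD i d = if i = m ∧ m < l.length then v else l.getD i d := by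
  by_cases him : i = m
  · subst him
    by_cases hm : i < l.length
    · rw [List.getD_eq_getElem?_getD, List.getElem?_set_self (by simpa using hm),
        if_pos ⟨rfl, hm⟩]
      rfl
    · rw [List.set_eq_of_length_le (Nat.le_of_not_lt hm), if_neg (fun hc => hm hc.2)]
  · rw [List.getD_eq_getElem?_getD, List.getElem?_set_ne (fun hc => him hc.symm),
      if_neg (fun hc => him hc.1), List.getD_eq_getElem?_getD]

lemma shape_pvClear (n : List (List Bool)) (x y : Int) (hy : 0 ≤ y) :
    (pvClear n x y).map List.length = n.map List.length := by
  unfold pvClear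
  rw [PySem.List.pySetD_of_nonneg _ _ hy]
  refine List.ext_getElem? (fun i => ?_)
  rw [List.getElem?_map, List.getElem?_map, List.getElem?_set]
  by_cases hiy : y.toNat = i
  · rw [if_pos hiy]
    by_cases hlen : y.toNat < n.length
    · rw [if_pos hlen]
      subst hiy
      rw [List.getElem?_eq_getElem hlen]
      simp only [Option.map_some]
      congr 1
      rw [PySem.List.length_pySetD, PySem.List.pyGetD_of_nonneg _ _ hy,
        List.getD_eq_getElem?_getD, List.getElem?_eq_getElem hlen]
      rfl
    · rw [if_neg hlen]
      subst hiy
      rw [List.getElem?_eq_none (Nat.le_of_not_lt hlen)]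
  · rw [if_neg hiy]

lemma cell_pvClear (n : List (List Bool)) (x' y' x y : Int)
    (hx' : 0 ≤ x') (hy' : 0 ≤ y') (hx : 0 ≤ x) (hy : 0 ≤ y) :
    pvCell (pvClear n x' y') x y = if x = x' ∧ y = y' then false else pvCell n x y := by
  unfold pvCell pvClear
  rw [PySem.List.pySetD_of_nonneg _ _ hy', PySem.List.pySetD_of_nonneg _ _ hx',
    PySem.List.pyGetD_of_nonneg _ _ hy', PySem.List.pyGetD_of_nonneg _ _ hy,
    PySem.List.pyGetD_of_nonneg _ _ hx,
    PySem.List.pyGetD_of_nonneg _ _ hy, PySem.List.pyGetD_of_nonneg _ _ hx,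
    getD_set_ite]
  by_cases hc1 : y.toNat = y'.toNat ∧ y'.toNat < n.length
  · rw [if_pos hc1]
    obtain ⟨hyy, hylen⟩ := hc1
    have hyeq : y = y' := by omega
    subst hyeq
    rw [getD_set_ite]
    by_cases hxx : x.toNat = x'.toNat
    · have hxeq : x = x' := by omega
      subst hxeq
      by_cases hxl : x.toNat < (n.getD y.toNat []).length
      · rw [if_pos ⟨rfl, hxl⟩, if_pos ⟨rfl, rfl⟩]
      · rw [if_neg (fun hc => hxl hc.2), if_pos ⟨rfl, rfl⟩,
          List.getD_eq_default _ _ (Nat.le_of_not_lt hxl)]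
    · have hxne : ¬(x = x') := fun hc => hxx (by rw [hc])
      rw [if_neg (fun hc => hxx hc.1), if_neg (fun hc => hxne hc.1)]
  · rw [if_neg hc1]
    by_cases hxy : x = x' ∧ y = y'
    · rw [if_pos hxy]
      have : n.length ≤ y.toNat := by
        rcases hxy with ⟨_, rfl⟩
        omega
      rw [List.getD_eq_default _ _ this]
      rfl
    · rw [if_neg hxy]

lemma removeStacks_eq (G : List (List Bool)) (F : List (Int × Int)) :
    removeStacks G F =
      (((F.countP (fun p => (pvRem G ((PySem.List.pyGetD G 0 []).length : Int) (G.length : Int) p))) : Int),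
       F.foldl (fun n p => if pvRem G ((PySem.List.pyGetD G 0 []).length : Int) (G.length : Int) p then pvClear n p.1 p.2 else n) G,
       F.foldl (fun s p => if pvRem G ((PySem.List.pyGetD G 0 []).length : Int) (G.length : Int) p then PySem.Set.update s (pvNbors ((PySem.List.pyGetD G 0 []).length : Int) (G.length : Int) p.1 p.2) else s) []) := by
  set W : Int := ((PySem.List.pyGetD G 0 []).length : Int) with hW
  set H : Int := (G.length : Int) with hH
  unfold removeStacks
  rw [← hW, ← hH]
  have hstep : ∀ (st : Int × List (List Bool) × List (Int × Int)) (xy : Int × Int),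
      (if pvCell G xy.1 xy.2 then
        (if ((pvNbors W H xy.1 xy.2).map (fun p => if pvCell G p.1 p.2 then (1:Int) else 0)).sum < 4 then
          (st.1 + 1, pvClear st.2.1 xy.1 xy.2, PySem.Set.update st.2.2 (pvNbors W H xy.1 xy.2))
        else st)
      else st)
      = (if pvRem G W H xy then st.1 + 1 else st.1,
         (if pvRem G W H xy then pvClear st.2.1 xy.1 xy.2 else st.2.1,
          if pvRem G W H xy then PySem.Set.update st.2.2 (pvNbors W H xy.1 xy.2) else st.2.2)) := by
    intro st xy
    by_cases h1 : pvCell G xy.1 xy.2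
    · by_cases h2 : ((pvNbors W H xy.1 xy.2).map (fun p => if pvCell G p.1 p.2 then (1:Int) else 0)).sum < 4
      · have hr : pvRem G W H xy = true := (pvRem_iff G W H xy).mpr ⟨h1, h2⟩
        simp [h1, h2, hr]
      · have hr : ¬ (pvRem G W H xy = true) := fun hc => h2 ((pvRem_iff G W H xy).mp hc).2
        simp [h1, h2, hr]
    · have hr : ¬ (pvRem G W H xy = true) := fun hc => h1 ((pvRem_iff G W H xy).mp hc).1
      simp [h1, hr]
  simp only [hstep]
  rw [PySem.List.foldl_prod_mk
        (fun t (xy : Int × Int) => if pvRem G W H xy then t + 1 else t)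
        (fun (s2 : List (List Bool) × List (Int × Int)) (xy : Int × Int) =>
          (if pvRem G W H xy then pvClear s2.1 xy.1 xy.2 else s2.1,
           if pvRem G W H xy then PySem.Set.update s2.2 (pvNbors W H xy.1 xy.2) else s2.2))
        F 0 (List.map (fun row => row) G, PySem.Set.empty),
      PySem.List.foldl_prod_mk
        (fun (n : List (List Bool)) (xy : Int × Int) => if pvRem G W H xy then pvClear n xy.1 xy.2 else n)
        (fun (s : List (Int × Int)) (xy : Int × Int) => if pvRem G W H xy then PySem.Set.update s (pvNbors W H xy.1 xy.2) else s)
        F (List.map (fun row => row) G) PySem.Set.empty,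
      PySem.List.foldl_ite_add_one (fun xy => pvRem G W H xy) F 0]
  simp [List.map_id']

lemma cell_clearFold (G : List (List Bool)) (w h : Int) (F : List (Int × Int))
    (hF : ∀ p ∈ F, inWin w h p) (n0 : List (List Bool)) (x y : Int) (hx : 0 ≤ x) (hy : 0 ≤ y) :
    pvCell (F.foldl (fun n p => if pvRem G w h p then pvClear n p.1 p.2 else n) n0) x y =
      if (x, y) ∈ F ∧ pvRem G w h (x, y) then false else pvCell n0 x y := by
  induction F generalizing n0 with
  | nil => simp
  | cons q F' ih =>
    simp only [List.foldl_cons]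
    rw [ih (fun p hp => hF p (List.mem_cons_of_mem q hp))]
    by_cases hmem : (x, y) ∈ F' ∧ pvRem G w h (x, y)
    · rw [if_pos hmem, if_pos ⟨List.mem_cons_of_mem q hmem.1, hmem.2⟩]
    · rw [if_neg hmem]
      by_cases hq : pvRem G w h q
      · rw [if_pos hq, cell_pvClear n0 q.1 q.2 x y (hF q List.mem_cons_self).1
          (hF q List.mem_cons_self).2.2.1 hx hy]
        by_cases hxy : x = q.1 ∧ y = q.2
        · have : (x, y) = q := by rw [Prod.ext_iff]; exact hxy
          rw [if_pos hxy, if_pos ⟨this ▸ List.mem_cons_self, this ▸ hq⟩]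
        · have hne : (x, y) ≠ q := fun hc => hxy ⟨congrArg Prod.fst hc, congrArg Prod.snd hc⟩
          rw [if_neg hxy, if_neg (fun hc => ?_)]
          rcases List.mem_cons.mp hc.1 with h1 | h1
          · exact hne h1
          · exact hmem ⟨h1, hc.2⟩
      · rw [if_neg hq, if_neg (fun hc => ?_)]
        rcases List.mem_cons.mp hc.1 with h1 | h1
        · exact hq (h1 ▸ hc.2)
        · exact hmem ⟨h1, hc.2⟩

lemma shape_clearFold (G : List (List Bool)) (w h : Int) (F : List (Int × Int))
    (hF : ∀ p ∈ F, inWin w h p) (n0 : List (List Bool)) :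
    (F.foldl (fun n p => if pvRem G w h p then pvClear n p.1 p.2 else n) n0).map List.length =
      n0.map List.length := by
  induction F generalizing n0 with
  | nil => simp
  | cons q F' ih =>
    simp only [List.foldl_cons]
    rw [ih (fun p hp => hF p (List.mem_cons_of_mem q hp))]
    by_cases hq : pvRem G w h q
    · rw [if_pos hq, shape_pvClear n0 q.1 q.2 (hF q List.mem_cons_self).2.2.1]
    · rw [if_neg hq]

lemma mem_deltaFold (G : List (List Bool)) (w h : Int) (F : List (Int × Int))
    (s0 : List (Int × Int)) (q : Int × Int) :
    q ∈ F.foldl (fun s p => if pvRem G w h p then PySem.Set.update s (pvNbors w h p.1 p.2) else s) s0 ↔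
      q ∈ s0 ∨ ∃ p ∈ F, pvRem G w h p ∧ q ∈ pvNbors w h p.1 p.2 := by
  induction F generalizing s0 with
  | nil => simp
  | cons r F' ih =>
    simp only [List.foldl_cons]
    rw [ih]
    by_cases hr : pvRem G w h r
    · rw [if_pos hr]
      rw [PySem.Set.mem_update]
      constructor
      · rintro (⟨hs | hn⟩ | ⟨p, hp, hrem, hnb⟩)
        · exact Or.inl hs
        · exact Or.inr ⟨r, List.mem_cons_self, hr, hn⟩
        · exact Or.inr ⟨p, List.mem_cons_of_mem r hp, hrem, hnb⟩
      · rintro (hs | ⟨p, hp, hrem, hnb⟩)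
        · exact Or.inl (Or.inl hs)
        · rcases List.mem_cons.mp hp with rfl | hp'
          · exact Or.inl (Or.inr hnb)
          · exact Or.inr ⟨p, hp', hrem, hnb⟩
    · rw [if_neg hr]
      constructor
      · rintro (hs | ⟨p, hp, hrem, hnb⟩)
        · exact Or.inl hs
        · exact Or.inr ⟨p, List.mem_cons_of_mem r hp, hrem, hnb⟩
      · rintro (hs | ⟨p, hp, hrem, hnb⟩)
        · exact Or.inl hs
        · rcases List.mem_cons.mp hp with rfl | hp'
          · exact absurd hrem hr
          · exact Or.inr ⟨p, hp', hrem, hnb⟩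

lemma nodup_deltaFold (G : List (List Bool)) (w h : Int) (F : List (Int × Int))
    (s0 : List (Int × Int)) (h0 : s0.Nodup) :
    (F.foldl (fun s p => if pvRem G w h p then PySem.Set.update s (pvNbors w h p.1 p.2) else s) s0).Nodup := by
  induction F generalizing s0 with
  | nil => exact h0
  | cons r F' ih =>
    simp only [List.foldl_cons]
    by_cases hr : pvRem G w h r
    · rw [if_pos hr]
      exact ih _ (PySem.Set.nodup_update _ _ h0)
    · rw [if_neg hr]
      exact ih _ h0

lemma pvStep_eq (w h : Int) (g : List (List Bool)) :
    pvStep w h g =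
      (((PySem.List.pyRange 0 h 1).map (fun y =>
          (((PySem.List.pyRange 0 w 1).countP (fun x => (pvRem g w h (x, y)))) : Int))).sum,
       (PySem.List.pyRange 0 h 1).map (fun y => (PySem.List.pyRange 0 w 1).map (fun x =>
          if pvRem g w h (x, y) then false else pvCell g x y))) := by
  unfold pvStep
  have hstep2 : ∀ (y : Int) (st2 : Int × List Bool) (x : Int),
      (if pvCell g x y = true ∧ pvCount g w h x y < 4 then (st2.1 + 1, st2.2 ++ [false])
       else (st2.1, st2.2 ++ [pvCell g x y]))
      = (if pvRem g w h (x, y) then st2.1 + 1 else st2.1,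
         st2.2 ++ [if pvRem g w h (x, y) then false else pvCell g x y]) := by
    intro y st2 x
    by_cases hc : pvRem g w h (x, y) = true
    · have : pvCell g x y = true ∧ pvCount g w h x y < 4 := by
        rw [pvCount_eq]
        exact (pvRem_iff g w h (x, y)).mp hc
      rw [if_pos this, if_pos hc, if_pos hc]
    · have : ¬(pvCell g x y = true ∧ pvCount g w h x y < 4) := by
        rw [pvCount_eq]
        exact fun hp => hc ((pvRem_iff g w h (x, y)).mpr hp)
      rw [if_neg this, if_neg hc, if_neg hc]
  simp only [hstep2]
  have hinner : ∀ (t0 : Int) (y : Int),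
      (PySem.List.pyRange 0 w 1).foldl (fun st2 x =>
        (if pvRem g w h (x, y) then st2.1 + 1 else st2.1,
         st2.2 ++ [if pvRem g w h (x, y) then false else pvCell g x y])) (t0, ([] : List Bool))
      = (t0 + (((PySem.List.pyRange 0 w 1).countP (fun x => (pvRem g w h (x, y)))) : Int),
         (PySem.List.pyRange 0 w 1).map (fun x => if pvRem g w h (x, y) then false else pvCell g x y)) := by
    intro t0 y
    rw [PySem.List.foldl_prod_mk
          (fun t x => if pvRem g w h (x, y) then t + 1 else t)
          (fun (r : List Bool) x => r ++ [if pvRem g w h (x, y) then false else pvCell g x y])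
          (PySem.List.pyRange 0 w 1) t0 [],
        PySem.List.foldl_if_add_one (fun x => pvRem g w h (x, y)),
        PySem.List.foldl_append_singleton_eq_map]
    rw [List.nil_append]
  simp only [hinner]
  rw [PySem.List.foldl_prod_mk
        (fun t y => t + (((PySem.List.pyRange 0 w 1).countP (fun x => (pvRem g w h (x, y)))) : Int))
        (fun (rows : List (List Bool)) y => rows ++ [(PySem.List.pyRange 0 w 1).map (fun x => if pvRem g w h (x, y) then false else pvCell g x y)])
        (PySem.List.pyRange 0 h 1) 0 [],
      PySem.List.foldl_add, PySem.List.foldl_append_singleton_eq_map]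
  rw [List.nil_append, zero_add]

lemma cell_pvStep_next (w h : Int) (g : List (List Bool)) (x y : Int) (hp : inWin w h (x, y)) :
    pvCell (pvStep w h g).2 x y = if pvRem g w h (x, y) then false else pvCell g x y := by
  rw [pvStep_eq]
  obtain ⟨h1, h2, h3, h4⟩ := hp
  unfold pvCell
  rw [PySem.List.pyGetD_map_pyRange_of_nonneg _ _ _ _ h3 h4,
    PySem.List.pyGetD_map_pyRange_of_nonneg _ _ _ _ h1 h2]

lemma length_eq_of_shape {n1 n2 : List (List Bool)}
    (h : n1.map List.length = n2.map List.length) : n1.length = n2.length := by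
  have := congrArg List.length h
  simpa using this

lemma width_eq_of_shape {n1 n2 : List (List Bool)}
    (h : n1.map List.length = n2.map List.length) :
    (PySem.List.pyGetD n1 0 []).length = (PySem.List.pyGetD n2 0 []).length := by
  rw [PySem.List.pyGetD_zero, PySem.List.pyGetD_zero]
  have h0 := congrArg (fun l => l.getD 0 0) h
  simp only [List.getD_eq_getElem?_getD, List.getElem?_map] at h0
  rw [List.getD_eq_getElem?_getD, List.getD_eq_getElem?_getD]
  cases hc1 : n1[0]? with
  | none =>
    cases hc2 : n2[0]? with
    | none => rfl
    | some r2 => rw [hc1, hc2] at h0; simpa using h0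
  | some r1 =>
    cases hc2 : n2[0]? with
    | none => rw [hc1, hc2] at h0; simpa using h0
    | some r2 => rw [hc1, hc2] at h0; simpa using h0

-- the per-round count of B's full pass, rewritten as a count over the window list
lemma stepCount_eq_windowL (w h : Int) (g : List (List Bool)) :
    ((PySem.List.pyRange 0 h 1).map (fun y =>
        (((PySem.List.pyRange 0 w 1).countP (fun x => (pvRem g w h (x, y)))) : Int))).sum
      = (((windowL w h).countP (fun p => (pvRem g w h p))) : Int) := by
  rw [windowL, countP_flatMap_sum]
  congr 1
  refine List.map_congr_left (fun y _ => ?_)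
  rw [List.countP_map]
  rfl

lemma pv_round_eq (w h : Int) (hw : 0 ≤ w) (hh : 0 < h) (GA GB : List (List Bool))
    (Δ : List (Int × Int)) (hInv : pvInv w h GA GB Δ) :
    (removeStacks GA Δ).1 = (pvStep w h GB).1 ∧
      pvInv w h (removeStacks GA Δ).2.1 (pvStep w h GB).2 (removeStacks GA Δ).2.2 := by
  obtain ⟨hlen, hwid, hcell, hnd, hwinΔ, hcomp⟩ := hInv
  have hRS := removeStacks_eq GA Δ
  rw [hwid, hlen] at hRS
  have hremiff : ∀ p : Int × Int, inWin w h p → (pvRem GA w h p ↔ pvRem GB w h p) :=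
    fun p hp => pvRem_congr hp hcell
  -- count equality
  have hcount : Δ.countP (fun p => (pvRem GA w h p)) =
      (windowL w h).countP (fun p => (pvRem GA w h p)) := by
    refine countP_eq_countP _ hnd (nodup_windowL w h) (fun a => ?_)
    constructor
    · rintro ⟨hm, hr⟩
      exact ⟨(mem_windowL w h a).mpr (hwinΔ a hm), hr⟩
    · rintro ⟨hm, hr⟩
      exact ⟨hcomp a ((mem_windowL w h a).mp hm) hr, hr⟩
  have hcount2 : (windowL w h).countP (fun p => (pvRem GA w h p)) =
      (windowL w h).countP (fun p => (pvRem GB w h p)) := by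
    refine List.countP_congr (fun p hp => ?_)
    exact hremiff p ((mem_windowL w h p).mp hp)
  -- cell formulas for the next grids
  have hcellNA : ∀ (x y : Int), 0 ≤ x → 0 ≤ y →
      pvCell (removeStacks GA Δ).2.1 x y =
        if (x, y) ∈ Δ ∧ pvRem GA w h (x, y) then false else pvCell GA x y := by
    intro x y hx hy
    rw [hRS]
    exact cell_clearFold GA w h Δ hwinΔ GA x y hx hy
  have hcellNB : ∀ (x y : Int), inWin w h (x, y) →
      pvCell (pvStep w h GB).2 x y = if pvRem GB w h (x, y) then false else pvCell GB x y :=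
    fun x y hp => cell_pvStep_next w h GB x y hp
  have hmemND : ∀ q : Int × Int,
      q ∈ (removeStacks GA Δ).2.2 ↔ ∃ p ∈ Δ, pvRem GA w h p ∧ q ∈ pvNbors w h p.1 p.2 := by
    intro q
    rw [hRS]
    rw [mem_deltaFold]
    simp only [List.not_mem_nil, false_or]
  constructor
  · rw [hRS, pvStep_eq]
    show (Δ.countP (fun p => (pvRem GA w h p)) : Int) = _
    rw [stepCount_eq_windowL, hcount, hcount2]
  · refine ⟨?_, ?_, ?_, ?_, ?_, ?_⟩
    · rw [hRS]
      have hs := shape_clearFold GA w h Δ hwinΔ GA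
      have := length_eq_of_shape hs
      rw [this]
      exact hlen
    · rw [hRS]
      have hs := shape_clearFold GA w h Δ hwinΔ GA
      have := width_eq_of_shape hs
      rw [this]
      exact hwid
    · rintro ⟨a, b⟩ hpwin
      rw [hcellNA a b hpwin.1 hpwin.2.2.1, hcellNB a b hpwin]
      by_cases hr : pvRem GA w h (a, b)
      · rw [if_pos ⟨hcomp (a, b) hpwin hr, hr⟩, if_pos ((hremiff (a, b) hpwin).mp hr)]
      · rw [if_neg (fun hc => hr hc.2), if_neg (fun hc => hr ((hremiff (a, b) hpwin).mpr hc))]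
        exact hcell (a, b) hpwin
    · rw [hRS]
      exact nodup_deltaFold GA w h Δ [] List.nodup_nil
    · intro q hq
      rw [hmemND q] at hq
      obtain ⟨p, _, _, hnb⟩ := hq
      exact inWin_of_mem_pvNbors hnb
    · rintro ⟨a, b⟩ hpwin hrem
      by_contra hnot
      obtain ⟨hcellN, hcntN⟩ := (pvRem_iff _ w h (a, b)).mp hrem
      rw [hcellNA a b hpwin.1 hpwin.2.2.1] at hcellN
      have hcnd : ¬((a, b) ∈ Δ ∧ pvRem GA w h (a, b)) := by
        intro hc
        rw [if_pos hc] at hcellN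
        exact Bool.false_ne_true hcellN
      rw [if_neg hcnd] at hcellN
      have hnrem : ¬ pvRem GA w h (a, b) := fun hr => hcnd ⟨hcomp (a, b) hpwin hr, hr⟩
      have hge : ¬ (pvCntS GA w h a b < 4) := fun hlt => hnrem ((pvRem_iff GA w h (a, b)).mpr ⟨hcellN, hlt⟩)
      have hq : ∀ q ∈ pvNbors w h a b,
          pvCell (removeStacks GA Δ).2.1 q.1 q.2 = pvCell GA q.1 q.2 := by
        rintro ⟨c, d⟩ hqm
        have hqwin := inWin_of_mem_pvNbors hqm
        rw [hcellNA c d hqwin.1 hqwin.2.2.1]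
        rw [if_neg]
        rintro ⟨hqΔ, hqrem⟩
        refine hnot ((hmemND (a, b)).mpr ⟨(c, d), hqΔ, hqrem, ?_⟩)
        exact (pvNbors_symm w h a b c d hpwin.1 hpwin.2.1 hpwin.2.2.1 hpwin.2.2.2
          hqwin.1 hqwin.2.1 hqwin.2.2.1 hqwin.2.2.2).mp hqm
      have hcnteq : pvCntS (removeStacks GA Δ).2.1 w h a b = pvCntS GA w h a b := by
        unfold pvCntS
        congr 1
        exact List.map_congr_left (fun q hqm => by rw [hq q hqm])
      exact hge (hcnteq ▸ hcntN)

lemma pv_loop_eq (w h : Int) (hw : 0 ≤ w) (hh : 0 < h) (fuel : Nat) :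
    ∀ (GA GB : List (List Bool)) (Δ : List (Int × Int)) (part2 : Int), pvInv w h GA GB Δ →
      pvLoopA fuel GA Δ part2 = pvLoopB fuel w h GB part2 := by
  induction fuel with
  | zero => intro GA GB Δ part2 _; rfl
  | succ n ih =>
    intro GA GB Δ part2 hInv
    obtain ⟨hc, hI⟩ := pv_round_eq w h hw hh GA GB Δ hInv
    show (if (removeStacks GA Δ).1 = 0 then part2 + (removeStacks GA Δ).1
          else pvLoopA n (removeStacks GA Δ).2.1 (removeStacks GA Δ).2.2 (part2 + (removeStacks GA Δ).1))
        = (if (pvStep w h GB).1 = 0 then part2 + (pvStep w h GB).1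
          else pvLoopB n w h (pvStep w h GB).2 (part2 + (pvStep w h GB).1))
    rw [hc]
    by_cases h0 : (pvStep w h GB).1 = 0
    · rw [if_pos h0, if_pos h0]
    · rw [if_neg h0, if_neg h0, ih _ _ _ _ hI]

lemma pvInv_init (i0 : String) (rest : List String)
    (hlines : ∀ line ∈ (i0 :: rest), i0.toList.length ≤ line.toList.length) :
    pvInv (i0.toList.length : Int) (((i0 :: rest).length : Nat) : Int)
      ((i0 :: rest).map (fun line => line.toList.map (fun c => c == '@')))
      ((i0 :: rest).map (fun line =>
        (PySem.List.pyRange 0 (i0.toList.length : Int) 1).map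
          (fun x => PySem.List.pyGetD line.toList x ' ' == '@')))
      (windowL (i0.toList.length : Int) (((i0 :: rest).length : Nat) : Int)) := by
  refine ⟨?_, ?_, ?_, nodup_windowL _ _, ?_, ?_⟩
  · rw [List.length_map]
  · rw [List.map_cons, PySem.List.pyGetD_zero_cons, List.length_map]
  · rintro ⟨a, b⟩ ⟨h1, h2, h3, h4⟩
    unfold pvCell
    have hbn : b.toNat < (i0 :: rest).length := by omega
    have hline : i0.toList.length ≤ ((i0 :: rest)[b.toNat]).toList.length :=
      hlines _ (List.getElem_mem hbn)
    have han : a.toNat < ((i0 :: rest)[b.toNat]).toList.length := by omega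
    rw [PySem.List.pyGetD_of_nonneg _ _ h3, PySem.List.pyGetD_of_nonneg _ _ h3,
      List.getD_eq_getElem?_getD, List.getD_eq_getElem?_getD,
      List.getElem?_map, List.getElem?_map, List.getElem?_eq_getElem hbn]
    simp only [Option.map_some, Option.getD_some]
    rw [PySem.List.pyGetD_of_nonneg _ _ h1,
      List.getD_eq_getElem?_getD, List.getElem?_map, List.getElem?_eq_getElem han,
      PySem.List.pyGetD_map_pyRange_of_nonneg _ _ _ _ h1 h2,
      PySem.List.pyGetD_of_nonneg _ _ h1,
      List.getD_eq_getElem?_getD, List.getElem?_eq_getElem han]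
    rfl
  · intro p hp
    exact (mem_windowL _ _ p).mp hp
  · intro p hpwin _
    exact (mem_windowL _ _ p).mpr hpwin

theorem solve_spec : Claim_equal_solve := by
  intro input _ hpre
  obtain ⟨hne, hlines⟩ := hpre
  obtain ⟨i0, rest, rfl⟩ := List.exists_cons_of_ne_nil hne
  have hlines' : ∀ line ∈ (i0 :: rest), i0.toList.length ≤ line.toList.length := by
    intro line hl
    simpa using hlines line hl
  have hw : (0 : Int) ≤ (i0.toList.length : Int) := Int.natCast_nonneg _
  have hh : (0 : Int) < (((i0 :: rest).length : Nat) : Int) := by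
    exact_mod_cast Nat.succ_pos rest.length
  obtain ⟨hc, hI⟩ := pv_round_eq (i0.toList.length : Int) (((i0 :: rest).length : Nat) : Int)
    hw hh _ _ _ (pvInv_init i0 rest hlines')
  simp only [Spec_solve, solve, solve_alt]
  rw [PySem.List.pyGetD_zero_cons i0 rest "", PySem.Str.len_eq]
  have hAw : (PySem.List.pyGetD (List.map (fun line => List.map (fun c => c == '@') line.toList)
      (i0 :: rest)) 0 []).length = i0.toList.length := by
    rw [List.map_cons, PySem.List.pyGetD_zero_cons, List.length_map]
  rw [hAw, List.length_map]
  rw [show ((PySem.List.pyRange 0 (((i0 :: rest).length : Nat) : Int) 1).flatMap (fun y =>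
        (PySem.List.pyRange 0 (i0.toList.length : Int) 1).map (fun x => (x, y))))
      = windowL (i0.toList.length : Int) (((i0 :: rest).length : Nat) : Int) from rfl]
  rw [PySem.Set.ofList_eq_self_of_nodup _ (nodup_windowL _ _)]
  rw [Int.toNat_natCast]
  rw [Prod.mk.injEq]
  exact ⟨hc, by rw [hc]; exact pv_loop_eq _ _ hw hh _ _ _ _ _ hI⟩
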